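-- pv_equiv track=rewrite | github.com/heathhenley/AOC | 2024/day22/22.py | generate
-- ===== SOURCE A (Python) =====
-- def generate(seed: int, n: int) -> int:
--   a = 16777216
--   res = seed
--   for _ in range(n):
--     res = ((res * 64) ^ res) % a
--     res = (int(res / 32) ^ res) % a
--     res = ((res * 2048) ^ res) % a
--   return res
-- ===== SOURCE B (Python) =====
-- def generate(seed: int, n: int) -> int:
--   # Each round is a GF(2)-linear map on the 24-bit state, so n rounds are the
--   # n-th power of a 24x24 bit matrix, computed by binary exponentiation.
--   if n <= 0:
--     return seed
--   M = 16777215  # 24-bit mask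
--
--   def step(v: int) -> int:
--     v = (v ^ (v << 6)) & M
--     v = v ^ (v >> 5)
--     v = (v ^ (v << 11)) & M
--     return v
--
--   def apply(cols: list, v: int) -> int:
--     r = 0
--     for c in cols:
--       if v & 1:
--         r ^= c
--       v >>= 1
--     return r
--
--   def matmul(a: list, b: list) -> list:
--     return [apply(a, c) for c in b]
--
--   cols = [step(1 << k) for k in range(24)]
--   p = [1 << k for k in range(24)]  # identity
--   e = n
--   while e > 0:
--     if e & 1:
--       p = matmul(cols, p)
--     cols = matmul(cols, cols)
--     e >>= 1
--   return apply(p, seed % 16777216)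
-- ===== Notes on version B (the rewrite author's own statement) =====
-- stated objective: faster
-- what changed: Each AoC round is a GF(2)-linear map on the 24-bit state, so B builds the 24x24 bit matrix of one round (24 column masks) and raises it to the n-th power by binary exponentiation instead of iterating the round n times.
import Mathlib
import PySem

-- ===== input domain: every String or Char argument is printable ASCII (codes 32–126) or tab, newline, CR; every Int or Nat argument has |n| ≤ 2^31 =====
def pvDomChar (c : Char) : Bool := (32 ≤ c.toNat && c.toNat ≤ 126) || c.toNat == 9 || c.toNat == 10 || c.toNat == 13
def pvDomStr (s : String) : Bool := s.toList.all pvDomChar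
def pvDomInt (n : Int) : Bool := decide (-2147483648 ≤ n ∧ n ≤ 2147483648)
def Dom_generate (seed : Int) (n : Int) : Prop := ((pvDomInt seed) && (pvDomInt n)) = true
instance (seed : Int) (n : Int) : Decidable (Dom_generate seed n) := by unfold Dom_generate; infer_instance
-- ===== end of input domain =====

-- B replaces the n-round loop by binary exponentiation of the 24x24 GF(2) bit matrix of one round.

-- ===== PORT A =====
-- loop body of A; `int(res / 32)` is PySem.Int.truncdiv (exact: 0 ≤ res < 2^24 < 2^53 there)
def pvStepA (res : Int) : Int :=
  let a : Int := 16777216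
  let r1 := PySem.Int.mod (PySem.Int.bxor (res * 64) res) a
  let r2 := PySem.Int.mod (PySem.Int.bxor (PySem.Int.truncdiv r1 32) r1) a
  PySem.Int.mod (PySem.Int.bxor (r2 * 2048) r2) a

def generate (seed : Int) (n : Int) : Int :=
  (PySem.List.pyRange 0 n 1).foldl (fun res _ => pvStepA res) seed

-- ===== PORT B =====
-- every intermediate Python int in Source B is nonnegative, so Nat's bitwise ops are exact here
def pvStepB (v : Nat) : Nat :=
  let m := 16777215
  let v1 := (v ^^^ v <<< 6) &&& m
  let v2 := v1 ^^^ v1 >>> 5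
  (v2 ^^^ v2 <<< 11) &&& m

-- `apply(cols, v)`: r accumulator, v shifted right each step
def pvApply : List Nat → Nat → Nat → Nat
  | [], _, r => r
  | c :: cs, v, r => pvApply cs (v >>> 1) (if v &&& 1 = 1 then r ^^^ c else r)

def pvMatmul (a b : List Nat) : List Nat := b.map (fun c => pvApply a c 0)

-- the `while e > 0` loop of Source B
def pvPowLoop (e : Nat) (cols p : List Nat) : List Nat :=
  if h : e = 0 then p
  else pvPowLoop (e / 2) (pvMatmul cols cols) (if e % 2 = 1 then pvMatmul cols p else p)
  termination_by e
  decreasing_by exact Nat.div_lt_self (Nat.pos_of_ne_zero h) (by norm_num)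

def generate_alt (seed : Int) (n : Int) : Int :=
  if n ≤ 0 then seed
  else
    let cols := (List.range 24).map (fun k => pvStepB (1 <<< k))
    let p := (List.range 24).map (fun k => (1 : Nat) <<< k)
    ((pvApply (pvPowLoop n.toNat cols p) (PySem.Int.mod seed 16777216).toNat 0 : Nat) : Int)

-- ===== PRECONDITION & SPEC =====
def Spec_generate (seed : Int) (n : Int) (out : Int) : Prop := out = generate_alt seed n
instance (seed : Int) (n : Int) (out : Int) : Decidable (Spec_generate seed n out) := by unfold Spec_generate; infer_instance

-- ===== CLAIM (what is proved, stated in full; the proofs are below) =====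
def Claim_equal_generate : Prop := ∀ (seed : Int) (n : Int), Dom_generate seed n → Spec_generate seed n (generate seed n)

-- ===== LEMMAS AND PROOFS =====

-- "linear and bounded": the invariant of every matrix in B's loop (columns of such an f)
def pvLB (f : Nat → Nat) : Prop :=
  (∀ x y, f (x ^^^ y) = f x ^^^ f y) ∧ ∀ v, v < 16777216 → f v < 16777216

def pvMat (f : Nat → Nat) : List Nat := (List.range 24).map (fun k => f (1 <<< k))

lemma pv_xor_mod_pow2 (a b k : Nat) : (a ^^^ b) % 2 ^ k = a % 2 ^ k ^^^ b % 2 ^ k := by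
  rw [← Nat.and_two_pow_sub_one_eq_mod, ← Nat.and_two_pow_sub_one_eq_mod,
      ← Nat.and_two_pow_sub_one_eq_mod, Nat.and_xor_distrib_right]

lemma pv_mask_xor (k u : Nat) (h : u < 2 ^ k) : (2 ^ k - 1) ^^^ u = 2 ^ k - 1 - u := by
  have h2 : 2 ^ k - 1 - u = 2 ^ k - (u + 1) := by omega
  apply Nat.eq_of_testBit_eq
  intro i
  rw [h2, Nat.testBit_xor, Nat.testBit_two_pow_sub_one, Nat.testBit_two_pow_sub_succ h]
  by_cases hi : i < k
  · simp [hi]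
  · have hik : k ≤ i := by omega
    have hu : u < 2 ^ i := lt_of_lt_of_le h (Nat.pow_le_pow_right (by norm_num) hik)
    simp [hi, Nat.testBit_lt_two_pow hu]

-- Python `^` followed by `% 2**24`, for same-sign arguments, is Nat xor of the low 24 bits
lemma pv_bxor_mod24 (x y : Int) (hs : (0 ≤ x ∧ 0 ≤ y) ∨ (x < 0 ∧ y < 0)) :
    PySem.Int.mod (PySem.Int.bxor x y) 16777216 =
      (((x % 16777216).toNat ^^^ (y % 16777216).toNat : Nat) : Int) := by
  rw [PySem.Int.mod_eq_emod_of_pos (by norm_num)]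
  rcases hs with ⟨hx, hy⟩ | ⟨hx, hy⟩
  · rw [PySem.Int.bxor_of_nonneg hx hy]
    have h1 : ((x % 16777216).toNat) = x.toNat % 16777216 := by omega
    have h2 : ((y % 16777216).toNat) = y.toNat % 16777216 := by omega
    have h3 : ((x.toNat ^^^ y.toNat : Nat) : Int) % 16777216
        = (((x.toNat ^^^ y.toNat) % 16777216 : Nat) : Int) := by omega
    rw [h1, h2, h3]
    norm_cast
    have := pv_xor_mod_pow2 x.toNat y.toNat 24
    norm_num at this
    exact this
  · have hbx : PySem.Int.bxor x y = (((-x - 1).toNat ^^^ (-y - 1).toNat : Nat) : Int) := by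
      simp [PySem.Int.bxor, not_le.mpr hx, not_le.mpr hy]
    rw [hbx]
    set p := (-x - 1).toNat with hp
    set q := (-y - 1).toNat with hq
    have hxp : ((x % 16777216).toNat) = 16777215 - p % 16777216 := by omega
    have hyq : ((y % 16777216).toNat) = 16777215 - q % 16777216 := by omega
    have h3 : ((p ^^^ q : Nat) : Int) % 16777216 = (((p ^^^ q) % 16777216 : Nat) : Int) := by omega
    rw [hxp, hyq, h3]
    norm_cast
    have hmod := pv_xor_mod_pow2 p q 24
    norm_num at hmod
    rw [hmod]
    have hp24 : p % 16777216 < 2 ^ 24 := by norm_num; omega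
    have hq24 : q % 16777216 < 2 ^ 24 := by norm_num; omega
    have e1 := pv_mask_xor 24 (p % 16777216) hp24
    have e2 := pv_mask_xor 24 (q % 16777216) hq24
    norm_num at e1 e2
    rw [← e1, ← e2]
    rw [Nat.xor_comm 16777215 (p % 16777216), Nat.xor_right_comm, Nat.xor_assoc]
    simp [Nat.xor_comm]

lemma pv_stepB_lt (v : Nat) : pvStepB v < 16777216 := by
  have h := Nat.and_le_right (n := ((v ^^^ v <<< 6) &&& 16777215 ^^^ ((v ^^^ v <<< 6) &&& 16777215) >>> 5) ^^^ ((v ^^^ v <<< 6) &&& 16777215 ^^^ ((v ^^^ v <<< 6) &&& 16777215) >>> 5) <<< 11) (m := 16777215)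
  simp only [pvStepB]
  omega

-- A's loop body equals B's `step` on the low 24 bits
lemma pv_stepA_eq (res : Int) :
    pvStepA res = ((pvStepB ((res % 16777216).toNat) : Nat) : Int) := by
  set s := (res % 16777216).toNat with hsdef
  have hslt : s < 16777216 := by omega
  set n1 : Nat := s * 64 % 16777216 ^^^ s with hn1
  have hn1lt : n1 < 16777216 := by
    have h1 : s * 64 % 16777216 < 2 ^ 24 := by norm_num; omega
    have h2 : s < 2 ^ 24 := by norm_num; omega
    have h3 := Nat.xor_lt_two_pow h1 h2
    rw [← hn1] at h3
    norm_num at h3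
    omega
  set n2 : Nat := n1 / 32 ^^^ n1 with hn2
  have hn2lt : n2 < 16777216 := by
    have h1 : n1 / 32 < 2 ^ 24 := by norm_num; omega
    have h2 : n1 < 2 ^ 24 := by norm_num; omega
    have h3 := Nat.xor_lt_two_pow h1 h2
    rw [← hn2] at h3
    norm_num at h3
    omega
  set n3 : Nat := n2 * 2048 % 16777216 ^^^ n2 with hn3
  have hsigns : (0 ≤ res * 64 ∧ 0 ≤ res) ∨ (res * 64 < 0 ∧ res < 0) := by
    by_cases h : 0 ≤ res
    · exact Or.inl ⟨by omega, h⟩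
    · exact Or.inr ⟨by omega, by omega⟩
  have hr1 : PySem.Int.mod (PySem.Int.bxor (res * 64) res) 16777216 = ((n1 : Nat) : Int) := by
    rw [pv_bxor_mod24 _ _ hsigns]
    have hm64 : ((res * 64 % 16777216).toNat) = s * 64 % 16777216 := by
      have := Int.mul_emod res 64 16777216
      omega
    rw [hm64, ← hsdef]
  have htd : PySem.Int.truncdiv ((n1 : Nat) : Int) 32 = ((n1 / 32 : Nat) : Int) := by
    unfold PySem.Int.truncdiv
    rw [Int.tdiv_eq_ediv_of_nonneg (Int.natCast_nonneg _)]
    omega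
  have hr2 : PySem.Int.mod (PySem.Int.bxor ((n1 / 32 : Nat) : Int) ((n1 : Nat) : Int)) 16777216
      = ((n2 : Nat) : Int) := by
    rw [pv_bxor_mod24 _ _ (Or.inl ⟨Int.natCast_nonneg _, Int.natCast_nonneg _⟩)]
    have hd1 : ((((n1 / 32 : Nat) : Int)) % 16777216).toNat = n1 / 32 := by omega
    have hd2 : ((((n1 : Nat) : Int)) % 16777216).toNat = n1 := by omega
    rw [hd1, hd2]
  have hr3 : PySem.Int.mod (PySem.Int.bxor (((n2 : Nat) : Int) * 2048) ((n2 : Nat) : Int)) 16777216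
      = ((n3 : Nat) : Int) := by
    rw [pv_bxor_mod24 _ _ (Or.inl ⟨by positivity, Int.natCast_nonneg _⟩)]
    have hd1 : ((((n2 : Nat) : Int) * 2048) % 16777216).toNat = n2 * 2048 % 16777216 := by omega
    have hd2 : ((((n2 : Nat) : Int)) % 16777216).toNat = n2 := by omega
    rw [hd1, hd2]
  have mask : ∀ w : Nat, w &&& 16777215 = w % 16777216 := by
    intro w
    have := Nat.and_two_pow_sub_one_eq_mod w 24
    norm_num at this
    exact this
  simp only [pvStepA, pvStepB]
  rw [hr1, htd, hr2, hr3]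
  have hshl6 : s <<< 6 = s * 64 := by rw [Nat.shiftLeft_eq]
  have hshr5 : ∀ w : Nat, w >>> 5 = w / 32 := by
    intro w; rw [Nat.shiftRight_eq_div_pow]
  have hshl11 : ∀ w : Nat, w <<< 11 = w * 2048 := by
    intro w; rw [Nat.shiftLeft_eq]
  have e1 : (s ^^^ s <<< 6) &&& 16777215 = n1 := by
    rw [Nat.and_xor_distrib_right, mask, mask, hshl6, Nat.mod_eq_of_lt hslt, hn1]
    exact Nat.xor_comm _ _
  have e2 : n1 ^^^ n1 >>> 5 = n2 := by
    rw [hshr5, hn2]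
    exact Nat.xor_comm _ _
  have e3 : (n2 ^^^ n2 <<< 11) &&& 16777215 = n3 := by
    rw [Nat.and_xor_distrib_right, mask, mask, hshl11, Nat.mod_eq_of_lt hn2lt, hn3]
    exact Nat.xor_comm _ _
  rw [e1, e2, e3]

-- accumulator of `apply` factors out
lemma pv_apply_acc (cs : List Nat) : ∀ v r, pvApply cs v r = r ^^^ pvApply cs v 0 := by
  induction cs with
  | nil => simp [pvApply]
  | cons c cs ih =>
    intro v r
    simp only [pvApply]
    rw [ih (v >>> 1) (if v &&& 1 = 1 then r ^^^ c else r),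
        ih (v >>> 1) (if v &&& 1 = 1 then 0 ^^^ c else 0)]
    split <;> simp [Nat.xor_assoc]

lemma pv_bit01 (v : Nat) : v &&& 1 = 0 ∨ v &&& 1 = 1 := by
  have := Nat.and_one_is_mod v
  omega

lemma pv_bit_decomp (v : Nat) : (v &&& 1) ^^^ (v >>> 1) <<< 1 = v := by
  apply Nat.eq_of_testBit_eq
  intro i
  cases i with
  | zero =>
    have h1 : ((v >>> 1) <<< 1).testBit 0 = false := by simp
    have h2 : (v &&& 1).testBit 0 = v.testBit 0 := by simp
    rw [Nat.testBit_xor, h1, h2, Bool.xor_false]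
  | succ j =>
    have h0 : (1 : Nat).testBit (j + 1) = false := by
      rw [Nat.testBit_succ]
      norm_num
    have h1 : (v &&& 1).testBit (j + 1) = false := by
      rw [Nat.testBit_and, h0, Bool.and_false]
    have h2 : ((v >>> 1) <<< 1).testBit (j + 1) = v.testBit (j + 1) := by
      rw [Nat.testBit_shiftLeft, Nat.testBit_shiftRight]
      simp [Nat.add_comm 1 j]
    rw [Nat.testBit_xor, h1, h2, Bool.false_xor]

lemma pv_lin_zero {f : Nat → Nat} (hf : ∀ x y, f (x ^^^ y) = f x ^^^ f y) : f 0 = 0 := by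
  have h := hf 0 0
  simp only [Nat.xor_self] at h
  omega

-- the matrix of a linear map acts as the map on inputs below 2^m
lemma pv_apply_basis (m : Nat) (f : Nat → Nat) (hf : ∀ x y, f (x ^^^ y) = f x ^^^ f y) :
    ∀ v, v < 2 ^ m → pvApply ((List.range m).map (fun k => f (1 <<< k))) v 0 = f v := by
  induction m generalizing f with
  | zero =>
    intro v hv
    have hv0 : v = 0 := by omega
    subst hv0
    rw [pv_lin_zero hf]
    rfl
  | succ m ih =>
    intro v hv
    rw [List.range_succ_eq_map]
    simp only [List.map_cons, List.map_map]
    simp only [pvApply]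
    rw [pv_apply_acc]
    have hg : ∀ x y, (fun x => f (x <<< 1)) (x ^^^ y) = (fun x => f (x <<< 1)) x ^^^ (fun x => f (x <<< 1)) y := by
      intro x y
      simp only
      rw [Nat.shiftLeft_xor_distrib, hf]
    have hcols : ((fun k => f (1 <<< k)) ∘ Nat.succ) = fun k => (fun x => f (x <<< 1)) (1 <<< k) := by
      funext k
      simp [Function.comp, Nat.shiftLeft_eq, Nat.pow_succ, Nat.mul_comm]
    rw [hcols]
    have hv2 : v >>> 1 < 2 ^ m := by
      rw [Nat.shiftRight_eq_div_pow]
      have : 2 ^ (m + 1) = 2 ^ m * 2 := by ring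
      omega
    rw [ih (fun x => f (x <<< 1)) hg (v >>> 1) hv2]
    rcases pv_bit01 v with hb | hb
    · have hd := pv_bit_decomp v
      rw [hb, Nat.zero_xor] at hd
      rw [hb, if_neg (by norm_num : ¬(0 : Nat) = 1), Nat.zero_xor, hd]
    · have hd := pv_bit_decomp v
      rw [hb] at hd
      rw [hb]
      simp only [Nat.zero_xor, Nat.shiftLeft_zero, if_pos]
      rw [← hf, hd]

lemma pv_apply_mat (f : Nat → Nat) (hf : pvLB f) (v : Nat) (hv : v < 16777216) :
    pvApply (pvMat f) v 0 = f v := by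
  have := pv_apply_basis 24 f hf.1 v (by norm_num; omega)
  simpa [pvMat] using this

lemma pv_matmul_mat (f g : Nat → Nat) (hf : pvLB f) (hg : pvLB g) :
    pvMatmul (pvMat f) (pvMat g) = pvMat (f ∘ g) := by
  unfold pvMatmul pvMat
  rw [List.map_map]
  apply List.map_congr_left
  intro k hk
  have hk24 : k < 24 := List.mem_range.mp hk
  have hlt : (1 : Nat) <<< k < 16777216 := by
    rw [Nat.one_shiftLeft]
    calc (2 : Nat) ^ k < 2 ^ 24 := Nat.pow_lt_pow_right (by norm_num) hk24
    _ = 16777216 := by norm_num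
  exact pv_apply_mat f hf (g (1 <<< k)) (hg.2 _ hlt)

lemma pv_LB_id : pvLB id := ⟨fun _ _ => rfl, fun _ h => h⟩

lemma pv_LB_comp {f g : Nat → Nat} (hf : pvLB f) (hg : pvLB g) : pvLB (f ∘ g) :=
  ⟨fun x y => by simp [Function.comp, hg.1, hf.1], fun v hv => hf.2 _ (hg.2 _ hv)⟩

lemma pv_stepB_linear (x y : Nat) : pvStepB (x ^^^ y) = pvStepB x ^^^ pvStepB y := by
  have stage1 : ∀ (k : Nat) (a b : Nat),
      ((a ^^^ b) ^^^ (a ^^^ b) <<< k) &&& 16777215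
        = ((a ^^^ a <<< k) &&& 16777215) ^^^ ((b ^^^ b <<< k) &&& 16777215) := by
    intro k a b
    rw [Nat.shiftLeft_xor_distrib, ← Nat.and_xor_distrib_right]
    congr 1
    simp [Nat.xor_assoc, Nat.xor_left_comm, Nat.xor_comm]
  have stage2 : ∀ (a b : Nat),
      (a ^^^ b) ^^^ (a ^^^ b) >>> 5 = (a ^^^ a >>> 5) ^^^ (b ^^^ b >>> 5) := by
    intro a b
    rw [Nat.shiftRight_xor_distrib]
    simp [Nat.xor_assoc, Nat.xor_left_comm, Nat.xor_comm]
  simp only [pvStepB]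
  rw [stage1 6 x y, stage2, stage1 11]

lemma pv_LB_stepB : pvLB pvStepB := ⟨pv_stepB_linear, fun v _ => pv_stepB_lt v⟩

lemma pv_LB_iterate (f : Nat → Nat) (hf : pvLB f) : ∀ N, pvLB f^[N] := by
  intro N
  induction N with
  | zero => simpa using pv_LB_id
  | succ N ih =>
    rw [Function.iterate_succ]
    exact pv_LB_comp ih hf

lemma pv_powLoop_mat : ∀ (e : Nat) (f g : Nat → Nat), pvLB f → pvLB g →
    pvPowLoop e (pvMat f) (pvMat g) = pvMat (f^[e] ∘ g) := by
  intro e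
  induction e using Nat.strong_induction_on with
  | _ e ih =>
    intro f g hf hg
    rw [pvPowLoop]
    by_cases he : e = 0
    · simp [he]
    · rw [dif_neg he]
      rw [pv_matmul_mat f f hf hf]
      have hstep : (if e % 2 = 1 then pvMatmul (pvMat f) (pvMat g) else pvMat g)
          = pvMat (f^[e % 2] ∘ g) := by
        rcases Nat.mod_two_eq_zero_or_one e with h | h
        · simp [h]
        · simp [h, pv_matmul_mat f g hf hg]
      rw [hstep]
      rw [ih (e / 2) (Nat.div_lt_self (Nat.pos_of_ne_zero he) (by norm_num)) (f ∘ f)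
            (f^[e % 2] ∘ g) (pv_LB_comp hf hf) (pv_LB_comp (pv_LB_iterate f hf _) hg)]
      congr 1
      have hf2 : f ∘ f = f^[2] := by
        funext x
        simp [Function.iterate_succ_apply]
      rw [hf2, ← Function.iterate_mul, ← Function.comp_assoc, ← Function.iterate_add]
      have he2 : 2 * (e / 2) + e % 2 = e := by omega
      rw [he2]

lemma pv_foldl_const {α β : Type} (l : List α) (f : β → β) :
    ∀ init, l.foldl (fun r _ => f r) init = f^[l.length] init := by
  induction l with
  | nil => intro init; rfl
  | cons a l ih =>
    intro init
    simp only [List.foldl, List.length_cons]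
    rw [ih (f init), Function.iterate_succ_apply]

lemma pv_iterB_cast (N : Nat) : ∀ v : Nat, v < 16777216 →
    pvStepA^[N] ((v : Nat) : Int) = ((pvStepB^[N] v : Nat) : Int) := by
  induction N with
  | zero => intro v _; rfl
  | succ N ih =>
    intro v hv
    rw [Function.iterate_succ_apply, Function.iterate_succ_apply]
    rw [pv_stepA_eq]
    have : (((v : Nat) : Int) % 16777216).toNat = v := by omega
    rw [this]
    exact ih (pvStepB v) (pv_stepB_lt v)

-- ===== VERDICT (by name: the statement is the Claim_ definition above) =====
theorem generate_spec : Claim_equal_generate := by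
  intro seed n _
  unfold Spec_generate
  simp only [generate, generate_alt]
  by_cases hn : n ≤ 0
  · rw [if_pos hn, PySem.List.pyRange_one_eq_nil (by omega : n ≤ 0)]
    rfl
  · rw [if_neg hn]
    rw [pv_foldl_const, PySem.List.length_pyRange_one]
    have hN : (n - 0).toNat = (n.toNat - 1) + 1 := by omega
    rw [hN, Function.iterate_succ_apply, pv_stepA_eq seed]
    rw [PySem.Int.mod_eq_emod_of_pos (by norm_num : (0:Int) < 16777216)]
    set s0 := (seed % 16777216).toNat with hs0def
    have hs0 : s0 < 16777216 := by omega
    rw [pv_iterB_cast (n.toNat - 1) (pvStepB s0) (pv_stepB_lt s0)]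
    have hcols : (List.range 24).map (fun k => pvStepB (1 <<< k)) = pvMat pvStepB := rfl
    have hid : (List.range 24).map (fun k => (1 : Nat) <<< k) = pvMat id := rfl
    rw [hcols, hid, pv_powLoop_mat n.toNat pvStepB id pv_LB_stepB pv_LB_id]
    rw [pv_apply_mat _ (pv_LB_comp (pv_LB_iterate pvStepB pv_LB_stepB n.toNat) pv_LB_id) s0 hs0]
    simp only [Function.comp_apply, id_eq]
    congr 1
    conv_rhs => rw [show n.toNat = (n.toNat - 1) + 1 from by omega]
    rw [Function.iterate_succ_apply]
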